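-- pv_equiv track=rewrite | github.com/codemed7-git/CodeRamzay | utils.py | create_encryption_dict
-- ===== SOURCE A (Python) =====
-- from typing import Dict, List, Tuple
--
-- KEY_PHRASE = 'asintoer'  # Анаграмма для кодирования частых символов
--
-- PHRASE_START_CODE = 0  # Начальный код для букв из ключевой фразы
--
-- PHRASE_END_CODE = 7  # Конечный код для букв из ключевой фразы
--
-- OTHER_START_CODE = 80  # Начальный код для остальных букв
--
-- OTHER_END_CODE = 99  # Конечный код для остальных букв
--
-- def create_encryption_dict(matrix: List[List[str]]) -> Dict[int, str]:
--     encryption_dict = {}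
--
--     # Инициализация словаря
--     for code in range(PHRASE_START_CODE, PHRASE_END_CODE + 1):
--         encryption_dict[code] = ''
--     for code in range(OTHER_START_CODE, OTHER_END_CODE + 1):
--         encryption_dict[code] = ''
--
--     # Заполнение словаря
--     phrase_chars = list(KEY_PHRASE)
--     phrase_index = PHRASE_START_CODE
--     other_index = OTHER_START_CODE
--
--     for col in range(len(matrix[0])):
--         for row in range(len(matrix)):
--             char = matrix[row][col]
--             if char != '*':
--                 # Проверяем, есть ли символ в ключевой фразе и еще не использован
--                 if char in phrase_chars:
--                     encryption_dict[phrase_index] = char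
--                     phrase_chars.remove(char)  # Удаляем использованный символ
--                     phrase_index += 1
--                 else:
--                     if other_index <= OTHER_END_CODE:
--                         encryption_dict[other_index] = char
--                         other_index += 1
--
--     return encryption_dict
-- ===== SOURCE B (Python) =====
-- from typing import Dict, List
--
-- KEY_PHRASE = 'asintoer'
--
-- def create_encryption_dict(matrix: List[List[str]]) -> Dict[int, str]:
--     # column-major character sequence (same IndexError on empty/ragged input as the original)
--     seq = [matrix[r][c] for c in range(len(matrix[0])) for r in range(len(matrix))]
--     key_set = set(KEY_PHRASE)
--     present = key_set.intersection(seq)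
--     # the key-phrase chars that occur, ordered by SORTING on their first-occurrence index
--     phrase = sorted(present, key=seq.index)
--     # first-occurrence index of each present key char; a position holds an "other" char
--     # exactly when it is not such a first occurrence (stateless test, no remaining set)
--     first = {ch: seq.index(ch) for ch in present}
--     others = [ch for i, ch in enumerate(seq) if ch != '*' and first.get(ch) != i][:20]
--     d = dict.fromkeys(range(0, 8), '')
--     d.update(dict.fromkeys(range(80, 100), ''))
--     d.update(enumerate(phrase))
--     d.update(enumerate(others, 80))
--     return d
-- ===== Notes on version B (the rewrite author's own statement) =====
-- stated objective: alternative
-- what changed: B replaces A's stateful scan (remaining-key list plus two running code counters updating the dict in place) by a declarative formulation: the phrase chars are obtained by sorting the set intersection of the key chars with the column-major sequence by first-occurrence index, the others by a stateless comprehension testing each position against a precomputed first-occurrence dict, capped by a slice, and the dict is assembled by merging fromkeys templates with two enumerate updates.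
import Mathlib
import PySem

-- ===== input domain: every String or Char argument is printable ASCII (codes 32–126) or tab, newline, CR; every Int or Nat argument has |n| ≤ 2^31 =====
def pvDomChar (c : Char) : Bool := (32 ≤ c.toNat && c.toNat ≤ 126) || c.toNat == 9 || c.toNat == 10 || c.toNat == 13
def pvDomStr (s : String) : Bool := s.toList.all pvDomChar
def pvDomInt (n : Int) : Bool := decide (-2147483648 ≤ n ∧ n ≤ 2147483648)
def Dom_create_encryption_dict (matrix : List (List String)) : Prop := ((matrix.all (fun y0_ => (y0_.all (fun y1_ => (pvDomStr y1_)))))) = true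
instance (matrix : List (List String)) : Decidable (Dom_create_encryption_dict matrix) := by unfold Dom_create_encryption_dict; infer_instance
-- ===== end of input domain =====

-- B replaces A's stateful scan (remaining-key list + two running code counters updating the
-- dict in place) by a declarative formulation: the phrase chars are SORTED by first-occurrence
-- index, the others are a stateless prefix-membership comprehension capped by a slice, and the
-- dict is assembled by merging fromkeys templates with two enumerate updates (objective:
-- alternative; same return value, not claimed faster).

-- list(KEY_PHRASE), the module constant both versions read
def pvKeyChars : List String := ["a", "s", "i", "n", "t", "o", "e", "r"]

-- ===== PORT A =====
-- matrix[row][col] is ported with pyGetD; under Pre_ every index is in range, so the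
-- default is never read and the port is exact.  len(matrix[0]) is (matrix.getD 0 []).length,
-- exact for matrix ≠ [].
def create_encryption_dict (matrix : List (List String)) : List (Int × String) :=
  let d0 : PySem.Dict Int String :=
    (PySem.List.pyRange 0 8 1).foldl (fun d code => d.insert code "") PySem.Dict.empty
  let d1 : PySem.Dict Int String :=
    (PySem.List.pyRange 80 100 1).foldl (fun d code => d.insert code "") d0
  let st :=
    (PySem.List.pyRange 0 ((matrix.getD 0 []).length : Int) 1).foldl (fun st col =>
      (PySem.List.pyRange 0 (matrix.length : Int) 1).foldl (fun st row =>
        let ch := PySem.List.pyGetD (PySem.List.pyGetD matrix row []) col ""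
        if ch ≠ "*" then
          if st.2.1.contains ch then
            (st.1.insert st.2.2.1 ch, (PySem.List.remove? st.2.1 ch).getD st.2.1,
             st.2.2.1 + 1, st.2.2.2)
          else if st.2.2.2 ≤ 99 then
            (st.1.insert st.2.2.2 ch, st.2.1, st.2.2.1, st.2.2.2 + 1)
          else st
        else st) st)
      (d1, pvKeyChars, (0 : Int), (80 : Int))
  st.1.items

-- ===== PORT B =====
-- sorted(key_set.intersection(seq), key=seq.index): every element of the intersection is in
-- seq, so seq.index never raises and is ported as (index? …).getD 0 (the default is never read).
def create_encryption_dict_alt (matrix : List (List String)) : List (Int × String) :=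
  let seq :=
    (PySem.List.pyRange 0 ((matrix.getD 0 []).length : Int) 1).flatMap (fun c =>
      (PySem.List.pyRange 0 (matrix.length : Int) 1).map (fun r =>
        PySem.List.pyGetD (PySem.List.pyGetD matrix r []) c ""))
  let keySet : PySem.Set String := PySem.Set.ofList pvKeyChars
  let present := PySem.Set.inter keySet seq
  let phrase := PySem.List.sorted present (fun ch => (PySem.List.index? seq ch).getD 0)
  -- {ch: seq.index(ch) for ch in present}: the dict is only looked up afterwards, so the
  -- set iteration order is immaterial
  let first : PySem.Dict String Int :=
    present.foldl (fun d ch => d.insert ch ((PySem.List.index? seq ch).getD 0 : Int))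
      PySem.Dict.empty
  let others := PySem.List.slice
      (((PySem.List.enumerate seq 0).filter (fun q =>
          q.2 != "*" && (PySem.Dict.get? first q.2 != some q.1))).map (fun q => q.2))
      none (some 20)
  let d0 : PySem.Dict Int String :=
    (PySem.List.pyRange 0 8 1).foldl (fun d code => d.insert code "") PySem.Dict.empty
  let d1 : PySem.Dict Int String :=
    (PySem.List.pyRange 80 100 1).foldl (fun d code => d.insert code "") d0
  let d2 : PySem.Dict Int String :=
    (PySem.List.enumerate phrase 0).foldl (fun d q => d.insert q.1 q.2) d1
  let d3 : PySem.Dict Int String :=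
    (PySem.List.enumerate others 80).foldl (fun d q => d.insert q.1 q.2) d2
  d3.items

-- ===== PRECONDITION & SPEC =====
-- Pre_ excludes exactly the inputs where Python A raises IndexError: the empty matrix
-- (len(matrix[0])) and ragged matrices with a row shorter than row 0.
def Pre_create_encryption_dict (matrix : List (List String)) : Prop :=
  matrix ≠ [] ∧ ∀ row ∈ matrix, (matrix.getD 0 []).length ≤ row.length
instance (matrix : List (List String)) : Decidable (Pre_create_encryption_dict matrix) := by
  unfold Pre_create_encryption_dict; infer_instance
def pvWitness_create_encryption_dict : List (List String) :=
  [["a", "b"], ["*", "s"]]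
def Spec_create_encryption_dict (matrix : List (List String)) (out : List (Int × String)) : Prop := out = create_encryption_dict_alt matrix
instance (matrix : List (List String)) (out : List (Int × String)) : Decidable (Spec_create_encryption_dict matrix out) := by unfold Spec_create_encryption_dict; infer_instance

-- ===== CLAIM (what is proved, stated in full; the proofs are below) =====
def Claim_equal_create_encryption_dict : Prop := ∀ (matrix : List (List String)), Dom_create_encryption_dict matrix → Pre_create_encryption_dict matrix → Spec_create_encryption_dict matrix (create_encryption_dict matrix)

-- ===== LEMMAS AND PROOFS =====

-- A's per-character step (the body of A's inner loop).
def pvStepA (st : PySem.Dict Int String × List String × Int × Int) (ch : String) :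
    PySem.Dict Int String × List String × Int × Int :=
  if ch ≠ "*" then
    if st.2.1.contains ch then
      (st.1.insert st.2.2.1 ch, (PySem.List.remove? st.2.1 ch).getD st.2.1,
       st.2.2.1 + 1, st.2.2.2)
    else if st.2.2.2 ≤ 99 then
      (st.1.insert st.2.2.2 ch, st.2.1, st.2.2.1, st.2.2.2 + 1)
    else st
  else st

-- an abstract "remaining set + two output lists" scan used only as a proof intermediary
def pvStepB (st : List String × List String × List String) (ch : String) :
    List String × List String × List String :=
  if ch = "*" then st
  else if PySem.Set.contains st.1 ch then
    (PySem.Set.discard st.1 ch, st.2.1 ++ [ch], st.2.2)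
  else if st.2.2.length < 20 then (st.1, st.2.1, st.2.2 ++ [ch])
  else st

def pvRun (l : List String) (pc ph ot : List String) : List String × List String × List String :=
  l.foldl pvStepB (pc, ph, ot)

-- the phrase chars of the suffix l after prefix p has been seen
def pvPh : List String → List String → List String
  | [], _ => []
  | ch :: t, p => if ch ∈ pvKeyChars ∧ ch ∉ p then ch :: pvPh t (p ++ [ch]) else pvPh t (p ++ [ch])

-- the "other" chars of the suffix l after prefix p, with remaining capacity k
def pvOt : List String → List String → Nat → List String
  | [], _, _ => []
  | ch :: t, p, k =>
    if ch = "*" then pvOt t (p ++ [ch]) k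
    else if ch ∈ pvKeyChars ∧ ch ∉ p then pvOt t (p ++ [ch]) k
    else if 0 < k then ch :: pvOt t (p ++ [ch]) (k - 1) else pvOt t (p ++ [ch]) k

-- the 28 pre-seeded codes, and dicts in "map over the codes" normal form
def pvKs : List Int := PySem.List.pyRange 0 8 1 ++ PySem.List.pyRange 80 100 1

def pvMapD (f : Int → String) : PySem.Dict Int String :=
  PySem.Dict.mk (pvKs.map (fun k => (k, f k)))

def pvUpd (f : Int → String) (k : Int) (v : String) : Int → String :=
  fun x => if x = k then v else f x

-- the value function after writing ph'/ot' extensions at codes ph.length… / 80+ot.length…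
def pvG (f : Int → String) (ph ot ph' ot' : List String) : Int → String := fun k =>
  if (ph.length : Int) ≤ k ∧ k < (ph'.length : Int) then ph'.getD k.toNat ""
  else if 80 + (ot.length : Int) ≤ k ∧ k < 80 + (ot'.length : Int) then ot'.getD (k - 80).toNat ""
  else f k

lemma pvDiscard_eq_erase (pc : List String) (ch : String) (h : pc.Nodup) :
    PySem.Set.discard pc ch = pc.erase ch := by
  rw [h.erase_eq_filter]; simp [PySem.Set.discard]; rfl

lemma pvMapD_insert (f : Int → String) (k : Int) (v : String) (hk : k ∈ pvKs) :
    (pvMapD f).insert k v = pvMapD (pvUpd f k v) := by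
  apply PySem.Dict.ext
  have hc : (pvMapD f).contains k = true := by
    rw [PySem.Dict.contains_eq_decide_mem_keys]
    simp [pvMapD, PySem.Dict.keys_mk, List.map_map, hk]
  rw [PySem.Dict.items_insert_of_contains _ v hc]
  show List.map _ (pvKs.map (fun k => (k, f k))) = pvKs.map (fun k' => (k', pvUpd f k v k'))
  rw [List.map_map]
  apply List.map_congr_left
  intro x hx
  by_cases hxk : x = k
  · subst hxk; simp [pvUpd]
  · simp [pvUpd, hxk]

lemma pvMapD_congr (f g : Int → String) (h : ∀ k ∈ pvKs, f k = g k) : pvMapD f = pvMapD g := by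
  unfold pvMapD
  congr 1
  exact List.map_congr_left (fun k hk => by rw [h k hk])

lemma pvRun_cons (ch : String) (t pc ph ot : List String) :
    pvRun (ch :: t) pc ph ot
      = pvRun t (pvStepB (pc, ph, ot) ch).1 (pvStepB (pc, ph, ot) ch).2.1 (pvStepB (pc, ph, ot) ch).2.2 := by
  simp [pvRun, List.foldl_cons]

lemma pvRun_ext (l : List String) : ∀ (pc ph ot : List String),
    ∃ dp dq, (pvRun l pc ph ot).2.1 = ph ++ dp ∧ (pvRun l pc ph ot).2.2 = ot ++ dq := by
  induction l with
  | nil => intro pc ph ot; exact ⟨[], [], by simp [pvRun], by simp [pvRun]⟩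
  | cons ch t ih =>
    intro pc ph ot
    rw [pvRun_cons]
    unfold pvStepB
    split_ifs with h1 h2 h3
    · exact ih pc ph ot
    · obtain ⟨dp, dq, h, h'⟩ := ih (PySem.Set.discard pc ch) (ph ++ [ch]) ot
      exact ⟨[ch] ++ dp, dq, by simpa using h, h'⟩
    · obtain ⟨dp, dq, h, h'⟩ := ih pc ph (ot ++ [ch])
      exact ⟨dp, [ch] ++ dq, h, by simpa using h'⟩
    · exact ih pc ph ot

lemma pvGetD_mid (ph dp : List String) (ch : String) :
    ((ph ++ [ch]) ++ dp).getD ph.length "" = ch := by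
  rw [List.getD_append _ _ _ _ (by simp), List.getD_eq_getElem _ _ (by simp),
    List.getElem_concat_length rfl]

lemma pvG_phrase (f : Int → String) (ph ot dp O : List String) (ch : String)
    (hph : ph.length < 8) :
    pvG (pvUpd f (ph.length : Int) ch) (ph ++ [ch]) ot ((ph ++ [ch]) ++ dp) O
      = pvG f ph ot ((ph ++ [ch]) ++ dp) O := by
  funext k
  simp only [pvG, pvUpd, List.length_append, List.length_cons, List.length_nil,
    Nat.cast_add, Nat.cast_one, Nat.cast_zero]
  split_ifs <;> (try rfl) <;> (try omega) <;>
    (have h3 : k.toNat = ph.length := by omega) <;> rw [h3] <;>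
    exact (pvGetD_mid ph dp ch).symm

lemma pvG_other (f : Int → String) (ph ot dq P : List String) (ch : String) :
    pvG (pvUpd f (80 + (ot.length : Int)) ch) ph (ot ++ [ch]) P ((ot ++ [ch]) ++ dq)
      = pvG f ph ot P ((ot ++ [ch]) ++ dq) := by
  funext k
  simp only [pvG, pvUpd, List.length_append, List.length_cons, List.length_nil,
    Nat.cast_add, Nat.cast_one, Nat.cast_zero]
  split_ifs <;> (try rfl) <;> (try omega) <;>
    (have h3 : (k - 80).toNat = ot.length := by omega) <;> rw [h3] <;>
    exact (pvGetD_mid ot dq ch).symm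

lemma pvG_nil (f : Int → String) (ph ot : List String) : pvG f ph ot ph ot = f := by
  funext k; simp only [pvG]
  rw [if_neg (by omega), if_neg (by omega)]

-- A's fold, started on a seeded map-form dict, computes the pvRun partition written into the map
lemma pvLoop (l : List String) : ∀ (pc ph ot : List String) (f : Int → String),
    pc.Nodup → ph.length + pc.length = 8 → ot.length ≤ 20 →
    l.foldl pvStepA (pvMapD f, pc, (ph.length : Int), 80 + (ot.length : Int))
      = (pvMapD (pvG f ph ot (pvRun l pc ph ot).2.1 (pvRun l pc ph ot).2.2),
         (pvRun l pc ph ot).1,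
         ((pvRun l pc ph ot).2.1.length : Int),
         80 + ((pvRun l pc ph ot).2.2.length : Int)) := by
  induction l with
  | nil =>
    intro pc ph ot f hnd hlen hot
    simp only [List.foldl_nil, pvRun, pvG_nil]
  | cons ch t ih =>
    intro pc ph ot f hnd hlen hot
    rw [List.foldl_cons, pvRun_cons]
    by_cases hstar : ch = "*"
    · have hA : pvStepA (pvMapD f, pc, (ph.length : Int), 80 + (ot.length : Int)) ch
          = (pvMapD f, pc, (ph.length : Int), 80 + (ot.length : Int)) := by
        simp [pvStepA, hstar]
      have hB : pvStepB (pc, ph, ot) ch = (pc, ph, ot) := by simp [pvStepB, hstar]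
      rw [hA, hB]
      exact ih pc ph ot f hnd hlen hot
    · by_cases hmem : ch ∈ pc
      · have hpos : 0 < pc.length := List.length_pos_of_mem hmem
        have hA : pvStepA (pvMapD f, pc, (ph.length : Int), 80 + (ot.length : Int)) ch
            = (pvMapD (pvUpd f (ph.length : Int) ch), pc.erase ch,
               (ph.length : Int) + 1, 80 + (ot.length : Int)) := by
          simp only [pvStepA]
          rw [if_pos (by simpa using hstar)]
          rw [if_pos (by simpa using hmem)]
          rw [PySem.List.remove?_eq_some_erase pc ch hmem]
          rw [pvMapD_insert f _ ch (by simp [pvKs, PySem.List.mem_pyRange_one]; omega)]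
          rfl
        have hB : pvStepB (pc, ph, ot) ch = (pc.erase ch, ph ++ [ch], ot) := by
          simp only [pvStepB]
          rw [if_neg hstar, if_pos (by simpa [PySem.Set.contains_iff] using hmem),
            pvDiscard_eq_erase pc ch hnd]
        rw [hA, hB]
        have hlen' : (ph ++ [ch]).length + (pc.erase ch).length = 8 := by
          rw [List.length_erase_of_mem hmem]; simp; omega
        have hih := ih (pc.erase ch) (ph ++ [ch]) ot (pvUpd f (ph.length : Int) ch)
          (hnd.erase ch) hlen' hot
        simp only [List.length_append, List.length_cons, List.length_nil, Nat.cast_add,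
          Nat.cast_one, zero_add] at hih
        rw [hih]
        obtain ⟨dp, dq, hP, hO⟩ := pvRun_ext t (pc.erase ch) (ph ++ [ch]) ot
        rw [hP, pvG_phrase f ph ot dp _ ch (by omega), ← hP]
      · by_cases hcap : ot.length < 20
        · have hA : pvStepA (pvMapD f, pc, (ph.length : Int), 80 + (ot.length : Int)) ch
              = (pvMapD (pvUpd f (80 + (ot.length : Int)) ch), pc,
                 (ph.length : Int), 80 + (ot.length : Int) + 1) := by
            simp only [pvStepA]
            rw [if_pos (by simpa using hstar)]
            rw [if_neg (by simpa using hmem), if_pos (by omega)]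
            rw [pvMapD_insert f _ ch (by simp [pvKs, PySem.List.mem_pyRange_one]; omega)]
          have hB : pvStepB (pc, ph, ot) ch = (pc, ph, ot ++ [ch]) := by
            simp only [pvStepB]
            rw [if_neg hstar, if_neg (by simpa [PySem.Set.contains_iff] using hmem),
              if_pos hcap]
          rw [hA, hB]
          have hot' : (ot ++ [ch]).length ≤ 20 := by simp; omega
          have hih := ih pc ph (ot ++ [ch]) (pvUpd f (80 + (ot.length : Int)) ch)
            hnd hlen hot'
          simp only [List.length_append, List.length_cons, List.length_nil, Nat.cast_add,
            Nat.cast_one, zero_add, add_assoc] at hih ⊢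
          rw [hih]
          obtain ⟨dp, dq, hP, hO⟩ := pvRun_ext t pc ph (ot ++ [ch])
          rw [hO, pvG_other f ph ot dq _ ch, ← hO]
        · have hA : pvStepA (pvMapD f, pc, (ph.length : Int), 80 + (ot.length : Int)) ch
              = (pvMapD f, pc, (ph.length : Int), 80 + (ot.length : Int)) := by
            simp only [pvStepA]
            rw [if_pos (by simpa using hstar)]
            rw [if_neg (by simpa using hmem), if_neg (by omega)]
          have hB : pvStepB (pc, ph, ot) ch = (pc, ph, ot) := by
            simp only [pvStepB]
            rw [if_neg hstar, if_neg (by simpa [PySem.Set.contains_iff] using hmem),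
              if_neg (by omega)]
          rw [hA, hB]
          exact ih pc ph ot f hnd hlen hot

-- pvRun's two output lists are pvPh / pvOt
lemma pvRun_char (l : List String) : ∀ (p pc ph ot : List String),
    pc.Nodup → (∀ ch, ch ∈ pc ↔ ch ∈ pvKeyChars ∧ ch ∉ p) → ot.length ≤ 20 →
    (pvRun l pc ph ot).2.1 = ph ++ pvPh l p
      ∧ (pvRun l pc ph ot).2.2 = ot ++ pvOt l p (20 - ot.length) := by
  induction l with
  | nil => intro p pc ph ot _ _ _; simp [pvRun, pvPh, pvOt]
  | cons ch t ih =>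
    intro p pc ph ot hnd hinv hot
    rw [pvRun_cons]
    have hinv' : ch ∉ pc → ∀ ch', ch' ∈ pc ↔ ch' ∈ pvKeyChars ∧ ch' ∉ p ++ [ch] := by
      intro hmem ch'
      constructor
      · intro h
        obtain ⟨h1, h2⟩ := (hinv ch').mp h
        refine ⟨h1, ?_⟩
        simp only [List.mem_append, List.mem_singleton]
        rintro (hc | rfl)
        · exact h2 hc
        · exact hmem h
      · rintro ⟨h1, h2⟩
        exact (hinv ch').mpr ⟨h1, fun hc => h2 (List.mem_append_left _ hc)⟩
    by_cases hstar : ch = "*"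
    · have hmem : ch ∉ pc := by
        intro h
        have := (hinv ch).mp h
        rw [hstar] at this
        exact absurd this.1 (by decide)
      have hB : pvStepB (pc, ph, ot) ch = (pc, ph, ot) := by simp [pvStepB, hstar]
      rw [hB]
      have hKn : ¬ (ch ∈ pvKeyChars ∧ ch ∉ p) := by
        rw [hstar]; rintro ⟨h, -⟩; exact absurd h (by decide)
      simp only [pvPh, pvOt, if_neg hKn, if_pos hstar]
      exact ih (p ++ [ch]) pc ph ot hnd (hinv' hmem) hot
    · by_cases hmem : ch ∈ pc
      · obtain ⟨hK, hp⟩ := (hinv ch).mp hmem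
        have hB : pvStepB (pc, ph, ot) ch = (pc.erase ch, ph ++ [ch], ot) := by
          simp only [pvStepB]
          rw [if_neg hstar, if_pos (by simpa [PySem.Set.contains_iff] using hmem),
            pvDiscard_eq_erase pc ch hnd]
        rw [hB]
        have hinv2 : ∀ ch', ch' ∈ pc.erase ch ↔ ch' ∈ pvKeyChars ∧ ch' ∉ p ++ [ch] := by
          intro ch'
          rw [hnd.mem_erase_iff, hinv ch']
          simp only [List.mem_append, List.mem_singleton]
          constructor
          · rintro ⟨hne, h1, h2⟩
            exact ⟨h1, by rintro (hc | rfl); exact h2 hc; exact hne rfl⟩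
          · rintro ⟨h1, h2⟩
            exact ⟨fun he => h2 (Or.inr he), h1, fun hc => h2 (Or.inl hc)⟩
        obtain ⟨hP, hO⟩ := ih (p ++ [ch]) (pc.erase ch) (ph ++ [ch]) ot
          (hnd.erase ch) hinv2 hot
        refine ⟨?_, ?_⟩
        · rw [hP]
          simp only [pvPh, if_pos (⟨hK, hp⟩ : ch ∈ pvKeyChars ∧ ch ∉ p)]
          simp
        · rw [hO]
          simp only [pvOt, if_neg hstar, if_pos (⟨hK, hp⟩ : ch ∈ pvKeyChars ∧ ch ∉ p)]
      · have hKn : ¬ (ch ∈ pvKeyChars ∧ ch ∉ p) := fun h => hmem ((hinv ch).mpr h)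
        by_cases hcap : ot.length < 20
        · have hB : pvStepB (pc, ph, ot) ch = (pc, ph, ot ++ [ch]) := by
            simp only [pvStepB]
            rw [if_neg hstar, if_neg (by simpa [PySem.Set.contains_iff] using hmem),
              if_pos hcap]
          rw [hB]
          obtain ⟨hP, hO⟩ := ih (p ++ [ch]) pc ph (ot ++ [ch]) hnd (hinv' hmem)
            (by simp only [List.length_append, List.length_cons, List.length_nil]; omega)
          refine ⟨?_, ?_⟩
          · rw [hP]
            simp only [pvPh, if_neg hKn]
          · rw [hO]
            simp only [pvOt, if_neg hstar, if_neg hKn, if_pos (show 0 < 20 - ot.length by omega)]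
            have h20 : 20 - (ot ++ [ch]).length = 20 - ot.length - 1 := by simp; omega
            rw [h20]
            simp
        · have hB : pvStepB (pc, ph, ot) ch = (pc, ph, ot) := by
            simp only [pvStepB]
            rw [if_neg hstar, if_neg (by simpa [PySem.Set.contains_iff] using hmem),
              if_neg (by omega)]
          rw [hB]
          obtain ⟨hP, hO⟩ := ih (p ++ [ch]) pc ph ot hnd (hinv' hmem) hot
          refine ⟨?_, ?_⟩
          · rw [hP]; simp only [pvPh, if_neg hKn]
          · rw [hO]
            simp only [pvOt, if_neg hstar, if_neg hKn,
              if_neg (show ¬ 0 < 20 - ot.length by omega)]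

lemma pvPh_mem : ∀ (l p : List String) (b : String),
    b ∈ pvPh l p ↔ b ∈ pvKeyChars ∧ b ∉ p ∧ b ∈ l := by
  intro l
  induction l with
  | nil => intro p b; simp [pvPh]
  | cons ch t ih =>
    intro p b
    by_cases hc : ch ∈ pvKeyChars ∧ ch ∉ p
    · simp only [pvPh, if_pos hc]
      constructor
      · intro h
        rcases List.mem_cons.mp h with h | h
        · subst h; exact ⟨hc.1, hc.2, List.mem_cons_self⟩
        · obtain ⟨h1, h2, h3⟩ := (ih _ _).mp h
          exact ⟨h1, fun hp => h2 (List.mem_append_left _ hp), List.mem_cons_of_mem _ h3⟩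
      · rintro ⟨h1, h2, h3⟩
        by_cases hbe : b = ch
        · subst hbe; exact List.mem_cons_self
        · refine List.mem_cons_of_mem _ ((ih _ _).mpr ⟨h1, by simp [hbe, h2], ?_⟩)
          rcases List.mem_cons.mp h3 with h | h
          · exact absurd h hbe
          · exact h
    · simp only [pvPh, if_neg hc]
      rw [ih]
      constructor
      · rintro ⟨h1, h2, h3⟩
        exact ⟨h1, fun hp => h2 (List.mem_append_left _ hp), List.mem_cons_of_mem _ h3⟩
      · rintro ⟨h1, h2, h3⟩
        have hbe : b ≠ ch := by rintro rfl; exact hc ⟨h1, h2⟩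
        refine ⟨h1, by simp [hbe, h2], ?_⟩
        rcases List.mem_cons.mp h3 with h | h
        · exact absurd h hbe
        · exact h

lemma pvIdx_lower (p l seqF : List String) (b : String) (hseq : p ++ l = seqF)
    (hb : b ∈ l) (hbp : b ∉ p) :
    ∃ j, PySem.List.index? seqF b = some j ∧ p.length ≤ j := by
  have hmem : b ∈ seqF := hseq ▸ List.mem_append_right p hb
  obtain ⟨j, hj⟩ := Option.isSome_iff_exists.mp ((PySem.List.index?_isSome_iff _ _).mpr hmem)
  refine ⟨j, hj, ?_⟩
  obtain ⟨hjlt, hget, -⟩ := PySem.List.getElem_of_index?_eq_some hj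
  by_contra h
  push_neg at h
  apply hbp
  subst hseq
  rw [List.getElem_append_left h] at hget
  exact hget ▸ List.getElem_mem _

lemma pvPh_pairwise (seqF : List String) : ∀ (l p : List String), p ++ l = seqF →
    (pvPh l p).Pairwise (fun a b =>
      (PySem.List.index? seqF a).getD 0 < (PySem.List.index? seqF b).getD 0) := by
  intro l
  induction l with
  | nil => intro p _; simp [pvPh]
  | cons ch t ih =>
    intro p hseq
    by_cases hc : ch ∈ pvKeyChars ∧ ch ∉ p
    · simp only [pvPh, if_pos hc]
      refine List.Pairwise.cons ?_ (ih (p ++ [ch]) (by simpa using hseq))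
      intro b hb
      obtain ⟨-, hbp, hbt⟩ := (pvPh_mem t (p ++ [ch]) b).mp hb
      have hch : PySem.List.index? seqF ch = some p.length := by
        rw [← hseq]
        exact (PySem.List.index?_eq_some_iff _ _ _).mpr ⟨p, t, rfl, rfl, hc.2⟩
      obtain ⟨j, hj, hge⟩ := pvIdx_lower (p ++ [ch]) t seqF b (by simpa using hseq) hbt hbp
      rw [hch, hj]
      simp only [Option.getD_some]
      simp only [List.length_append, List.length_cons, List.length_nil] at hge
      omega
    · simp only [pvPh, if_neg hc]
      exact ih (p ++ [ch]) (by simpa using hseq)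

lemma pvPh_nodup (seqF : List String) : (pvPh seqF []).Nodup := by
  have h := pvPh_pairwise seqF seqF [] rfl
  exact h.imp (fun hlt he => by subst he; exact absurd hlt (lt_irrefl _))

lemma pvPh_len (seqF : List String) : (pvPh seqF []).length ≤ 8 := by
  have hsub : pvPh seqF [] ⊆ pvKeyChars := fun b hb => ((pvPh_mem _ _ _).mp hb).1
  have h := (List.subperm_of_subset (pvPh_nodup seqF) hsub).length_le
  simpa [pvKeyChars] using h

lemma pvOt_zero : ∀ (l p : List String), pvOt l p 0 = [] := by
  intro l
  induction l with
  | nil => intro p; simp [pvOt]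
  | cons ch t ih =>
    intro p
    simp only [pvOt]
    split_ifs <;> first | exact ih _ | omega

lemma pvOt_len : ∀ (l p : List String) (k : Nat), (pvOt l p k).length ≤ k := by
  intro l
  induction l with
  | nil => intro p k; simp [pvOt]
  | cons ch t ih =>
    intro p k
    simp only [pvOt]
    split_ifs with h1 h2 h3
    · exact ih _ _
    · exact ih _ _
    · simp only [List.length_cons]
      have := ih (p ++ [ch]) (k - 1)
      omega
    · exact ih _ _

lemma pvDictGet (l : List String) : ∀ (d : PySem.Dict String Int) (v : String → Int) (x : String),
    PySem.Dict.get? (l.foldl (fun d c => d.insert c (v c)) d) x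
      = if x ∈ l then some (v x) else PySem.Dict.get? d x := by
  induction l with
  | nil => intro d v x; simp
  | cons c rest ih =>
    intro d v x
    rw [List.foldl_cons, ih]
    by_cases hx : x ∈ rest
    · rw [if_pos hx, if_pos (List.mem_cons_of_mem _ hx)]
    · rw [if_neg hx]
      by_cases hxc : x = c
      · subst hxc
        rw [PySem.Dict.get?_insert_self, if_pos List.mem_cons_self]
      · rw [PySem.Dict.get?_insert_of_ne _ _ hxc, if_neg (by simp [hxc, hx])]

-- first.get(ch) == i at ch's own position i = |p| says: ch is a key char not seen before
lemma pvFirstHead (seqF p t : List String) (ch : String) (hseq : p ++ ch :: t = seqF) :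
    PySem.Dict.get? ((PySem.Set.inter (PySem.Set.ofList pvKeyChars) seqF).foldl
        (fun d c => d.insert c ((PySem.List.index? seqF c).getD 0 : Int)) PySem.Dict.empty) ch
      = some ((p.length : Nat) : Int) ↔ (ch ∈ pvKeyChars ∧ ch ∉ p) := by
  rw [pvDictGet]
  have hchseq : ch ∈ seqF := by
    rw [← hseq]
    exact List.mem_append_right _ List.mem_cons_self
  by_cases hK : ch ∈ pvKeyChars
  · rw [if_pos (by rw [PySem.Set.mem_inter, PySem.Set.mem_ofList]; exact ⟨hK, hchseq⟩)]
    constructor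
    · intro h
      refine ⟨hK, ?_⟩
      intro hp
      have hpe : PySem.List.index? seqF ch = PySem.List.index? p ch := by
        rw [← hseq]
        exact PySem.List.index?_append_of_mem _ hp
      obtain ⟨j, hj⟩ := Option.isSome_iff_exists.mp ((PySem.List.index?_isSome_iff _ _).mpr hp)
      obtain ⟨hjlt, -, -⟩ := PySem.List.getElem_of_index?_eq_some hj
      rw [hpe, hj] at h
      simp at h
      omega
    · rintro ⟨-, hp⟩
      have hidx : PySem.List.index? seqF ch = some p.length := by
        rw [← hseq]
        exact (PySem.List.index?_eq_some_iff _ _ _).mpr ⟨p, t, rfl, rfl, hp⟩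
      rw [hidx]
      simp
  · rw [if_neg (by rw [PySem.Set.mem_inter, PySem.Set.mem_ofList]; exact fun h => hK h.1)]
    rw [PySem.Dict.get?_empty]
    simp [hK]

lemma pvOt_eq (seqF : List String) : ∀ (l p : List String) (k : Nat), p ++ l = seqF →
    pvOt l p k = (((PySem.List.enumerate l (p.length : Int)).filter (fun q =>
        q.2 != "*" && (PySem.Dict.get?
          ((PySem.Set.inter (PySem.Set.ofList pvKeyChars) seqF).foldl
            (fun d c => d.insert c ((PySem.List.index? seqF c).getD 0 : Int)) PySem.Dict.empty)
          q.2 != some q.1))).map (fun q => q.2)).take k := by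
  intro l
  induction l with
  | nil => intro p k _; simp [pvOt, PySem.List.enumerate]
  | cons ch t ih =>
    intro p k hseq
    rw [PySem.List.enumerate_cons]
    by_cases hstar : ch = "*"
    · rw [List.filter_cons_of_neg (by simp [hstar])]
      simp only [pvOt, if_pos hstar]
      rw [ih (p ++ [ch]) k (by simpa using hseq)]
      congr 2
      simp
    · by_cases hc : ch ∈ pvKeyChars ∧ ch ∉ p
      · have hsome := (pvFirstHead seqF p t ch hseq).mpr hc
        simp only [PySem.List.index?_eq_idxOf?] at hsome
        rw [List.filter_cons_of_neg (by simp [hstar, hsome])]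
        simp only [pvOt, if_neg hstar, if_pos hc]
        rw [ih (p ++ [ch]) k (by simpa using hseq)]
        congr 2
        simp
      · have hns : ¬ (PySem.Dict.get?
            ((PySem.Set.inter (PySem.Set.ofList pvKeyChars) seqF).foldl
              (fun d c => d.insert c ((PySem.List.index? seqF c).getD 0 : Int)) PySem.Dict.empty)
            ch = some ((p.length : Nat) : Int)) :=
          fun h => hc ((pvFirstHead seqF p t ch hseq).mp h)
        simp only [PySem.List.index?_eq_idxOf?] at hns
        rw [List.filter_cons_of_pos (by simp [hstar, hns]), List.map_cons]
        simp only [pvOt, if_neg hstar, if_neg hc]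
        rcases Nat.eq_zero_or_pos k with hk | hk
        · subst hk
          rw [pvOt_zero, List.take_zero]
          simp
        · rw [if_pos hk]
          rcases Nat.exists_eq_add_of_lt hk with ⟨k', rfl⟩
          simp only [Nat.zero_add] at *
          rw [List.take_succ_cons]
          congr 1
          rw [ih (p ++ [ch]) (k' + 1 - 1) (by simpa using hseq)]
          congr 2
          simp

-- folding enumerate-inserts into a map-form dict
lemma pvEnumFold : ∀ (l : List String) (s : Int) (f : Int → String),
    (∀ j : Nat, j < l.length → (s + (j : Int)) ∈ pvKs) →
    (PySem.List.enumerate l s).foldl (fun d q => d.insert q.1 q.2) (pvMapD f)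
      = pvMapD (fun k => if s ≤ k ∧ k < s + (l.length : Int) then l.getD (k - s).toNat "" else f k) := by
  intro l
  induction l with
  | nil =>
    intro s f _
    simp only [PySem.List.enumerate, List.length_nil, Nat.cast_zero, add_zero]
    apply pvMapD_congr
    intro k _
    rw [if_neg (by omega)]
  | cons ch t ih =>
    intro s f hk
    rw [PySem.List.enumerate_cons, List.foldl_cons]
    have hs : s ∈ pvKs := by
      have := hk 0 (by simp)
      simpa using this
    rw [show (pvMapD f).insert s ch = pvMapD (pvUpd f s ch) from pvMapD_insert f s ch hs]
    rw [ih (s + 1) (pvUpd f s ch) (fun j hj => by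
      have h2 : s + ((j + 1 : Nat) : Int) = s + 1 + (j : Int) := by push_cast; ring
      exact h2 ▸ hk (j + 1) (by simpa using Nat.succ_lt_succ hj))]
    apply pvMapD_congr
    intro k _
    by_cases h1 : k = s
    · subst h1
      rw [if_neg (by omega), if_pos (by simp only [List.length_cons, Nat.cast_add, Nat.cast_one]; omega)]
      simp [pvUpd]
    · by_cases h2 : s + 1 ≤ k ∧ k < s + 1 + (t.length : Int)
      · rw [if_pos h2, if_pos (by simp only [List.length_cons, Nat.cast_add, Nat.cast_one]; omega)]
        have h3 : (k - s).toNat = (k - (s + 1)).toNat + 1 := by omega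
        rw [h3, List.getD_cons_succ]
      · rw [if_neg h2, if_neg (by simp only [List.length_cons, Nat.cast_add, Nat.cast_one]; omega)]
        simp [pvUpd, h1]

set_option maxHeartbeats 2000000 in
lemma pvMain (matrix : List (List String)) :
    create_encryption_dict matrix = create_encryption_dict_alt matrix := by
  simp only [create_encryption_dict, create_encryption_dict_alt]
  set seq := (PySem.List.pyRange 0 ((matrix.getD 0 []).length : Int) 1).flatMap (fun c =>
      (PySem.List.pyRange 0 (matrix.length : Int) 1).map (fun r =>
        PySem.List.pyGetD (PySem.List.pyGetD matrix r []) c "")) with hseq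
  -- the common init dict is the seeded map-form dict
  have hinit :
      (PySem.List.pyRange 80 100 1).foldl (fun d code => d.insert code "")
        ((PySem.List.pyRange 0 8 1).foldl (fun d code => d.insert code "") PySem.Dict.empty)
      = pvMapD (fun _ => "") := by decide
  rw [hinit]
  -- ===== A side: nested loops = one fold of pvStepA over seq, then pvLoop + pvRun_char =====
  have hnest :
      (PySem.List.pyRange 0 ((matrix.getD 0 []).length : Int) 1).foldl (fun st col =>
        (PySem.List.pyRange 0 (matrix.length : Int) 1).foldl (fun st row =>
          pvStepA st (PySem.List.pyGetD (PySem.List.pyGetD matrix row []) col "")) st)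
        (pvMapD (fun _ => ""), pvKeyChars, (0 : Int), (80 : Int))
      = seq.foldl pvStepA (pvMapD (fun _ => ""), pvKeyChars, (0 : Int), (80 : Int)) := by
    rw [hseq, List.foldl_flatMap]
    simp only [List.foldl_map]
  have hA : ((PySem.List.pyRange 0 ((matrix.getD 0 []).length : Int) 1).foldl (fun st col =>
        (PySem.List.pyRange 0 (matrix.length : Int) 1).foldl (fun st row =>
          let ch := PySem.List.pyGetD (PySem.List.pyGetD matrix row []) col ""
          if ch ≠ "*" then
            if st.2.1.contains ch then
              (st.1.insert st.2.2.1 ch, (PySem.List.remove? st.2.1 ch).getD st.2.1,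
               st.2.2.1 + 1, st.2.2.2)
            else if st.2.2.2 ≤ 99 then
              (st.1.insert st.2.2.2 ch, st.2.1, st.2.2.1, st.2.2.2 + 1)
            else st
          else st) st)
        (pvMapD (fun _ => ""), pvKeyChars, (0 : Int), (80 : Int)))
      = seq.foldl pvStepA (pvMapD (fun _ => ""), pvKeyChars, (0 : Int), (80 : Int)) := by
    rw [← hnest]
    rfl
  rw [hA]
  have hloop := pvLoop seq pvKeyChars [] [] (fun _ => "") (by decide) (by decide) (by decide)
  simp only [List.length_nil, Nat.cast_zero, add_zero] at hloop
  rw [hloop]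
  obtain ⟨hP, hO⟩ := pvRun_char seq [] pvKeyChars [] [] (by decide)
    (fun ch => by simp) (by decide)
  simp only [List.nil_append] at hP hO
  rw [hP, hO]
  -- ===== B side: phrase = pvPh seq [], others = pvOt seq [] 20 =====
  have hphrase : PySem.List.sorted (PySem.Set.inter (PySem.Set.ofList pvKeyChars) seq)
      (fun ch => (PySem.List.index? seq ch).getD 0) = pvPh seq [] := by
    apply PySem.List.sorted_eq_of_perm_of_pairwise_lt
    · rw [List.perm_ext_iff_of_nodup (pvPh_nodup seq)
        (PySem.Set.nodup_inter _ _ (PySem.Set.nodup_ofList _))]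
      intro a
      rw [PySem.Set.mem_inter, PySem.Set.mem_ofList, pvPh_mem]
      simp
    · exact pvPh_pairwise seq seq [] rfl
  have hothers : PySem.List.slice
      (((PySem.List.enumerate seq 0).filter (fun q =>
          q.2 != "*" && (PySem.Dict.get?
            ((PySem.Set.inter (PySem.Set.ofList pvKeyChars) seq).foldl
              (fun d c => d.insert c ((PySem.List.index? seq c).getD 0 : Int)) PySem.Dict.empty)
            q.2 != some q.1))).map (fun q => q.2))
      none (some 20) = pvOt seq [] 20 := by
    rw [PySem.List.slice_to _ (by norm_num)]
    have h20 : ((20 : Int)).toNat = 20 := rfl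
    rw [h20, pvOt_eq seq seq [] 20 rfl]
    simp
  rw [hphrase, hothers]
  -- ===== assemble B's dict folds into map form and compare pointwise =====
  have hlenP : (pvPh seq []).length ≤ 8 := pvPh_len seq
  have hlenO : (pvOt seq [] 20).length ≤ 20 := pvOt_len seq [] 20
  rw [pvEnumFold (pvPh seq []) 0 (fun _ => "") (fun j hj => by
    simp only [pvKs, List.mem_append, PySem.List.mem_pyRange_one]
    left; omega)]
  rw [pvEnumFold (pvOt seq [] 20) 80 _ (fun j hj => by
    simp only [pvKs, List.mem_append, PySem.List.mem_pyRange_one]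
    right; omega)]
  congr 1
  apply pvMapD_congr
  intro k _
  simp only [pvG, List.length_nil, Nat.cast_zero, add_zero, zero_add]
  by_cases h1 : (0 : Int) ≤ k ∧ k < ((pvPh seq []).length : Int)
  · rw [if_pos h1, if_neg (by omega), if_pos (by omega)]
    congr 1
    omega
  · rw [if_neg h1]
    by_cases h2 : (80 : Int) ≤ k ∧ k < 80 + ((pvOt seq [] 20).length : Int)
    · rw [if_pos h2, if_pos (by omega)]
    · rw [if_neg h2, if_neg (by omega), if_neg (by omega)]

-- ===== VERDICT (by name: the statement is the Claim_ definition above) =====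
theorem create_encryption_dict_spec : Claim_equal_create_encryption_dict := by
  intro matrix _ _
  exact pvMain matrix
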